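/- GENERATED by mk_final_copies.py from the proof of the farm's unit `imdct_step3_inner_s_loop_ld654.3` (farm:imdct_step3_inner_s_loop_ld654.3.1: Proof.lean) as the
   re-elaboration sweep compiled it — do not edit. -/
import Asan.CheckWalk
import Vorbis.Spec.Units.imdct_step3_inner_s_loop_ld654_3
open X86 X86.User Asan Vorbis Vorbis.Spec

set_option maxRecDepth 4000
set_option maxHeartbeats 4000000

namespace Vorbis.Spec.imdct_step3_inner_s_loop_ld654_3

/-- The arithmetic of the loop test `while (z > base)` (0x106c47, stb_vorbis_fixed.c:2620): with `z + 64 t = z0` and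
`base + 64 n' = z0`, the unsigned `base < z` means that fewer than `n'` iterations are done. -/
theorem lt_of_base_lt_z {z base z0 t n' : Nat} (hz : z + 64 * t = z0) (hbase : base + 64 * n' = z0)
    (hlt : base < z) : t < n' := by
  omega

end Vorbis.Spec.imdct_step3_inner_s_loop_ld654_3

/-- Segment 3 of `imdct_step3_inner_s_loop_ld654` (`loop1` = 0x106c47 … 0x106c5e: `cmp r15, rbx ; jb body`, else `add rsp, 28H`,
six pops and `ret`): from the loop invariant `AtHead` either into the body at `cut1` with `t < n'` (the assertion `AtBody`, rebuilt
from the entry assertion's fields: nothing changed but RIP and the status flags), or to the function's `Returned` (made with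
`Returned.mk` by hand: `saved` from the popped slots, `same` and the post from the carried fields). -/
theorem Vorbis.Spec.Worked.imdct_step3_inner_s_loop_ld654_3_ok : Vorbis.Spec.imdct_step3_inner_s_loop_ld654_3.Statement := by
  unfold Vorbis.Spec.imdct_step3_inner_s_loop_ld654_3.Statement
  intro Lay hLay μ hμ u₀ hcode others frames len i0 ue ret t v hv
  -- 1. the entry assertion, field by field
  obtain ⟨hrip, hbody, hle, hz, hbase⟩ := hv
  obtain ⟨he, hpre, hcodeok, habi, hframe, hsame, hshadow⟩ := hbody
  obtain ⟨hrsp, sret, s15, s14, s13, s12, sbp, sbx⟩ := hframe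
  have he0 := he
  v_entry he
  -- 2. the present state's facts under the names the walker reads
  have hdf := habi.1
  have hmx := habi.2
  have hsse : SseOK v := sseOK_of_abiInv habi
  -- 3./4. the walk: 0x106c47 `cmp r15, rbx ; jb 1069af`, then the epilogue to the `ret`
  u_walk hcode [hμ.vendor] until [Vorbis.L.imdct_step3_inner_s_loop_ld654.cut1] span [Vorbis.L.textLo, Vorbis.L.textHi] side (v_side)
  · -- 0x106c4a taken (stb_vorbis_fixed.c:2620, `z > base`): into the body at `cut1`; nothing changed but RIP and the status flags
    refine ReachVia.done (Or.inl ⟨w_rip, ⟨⟨he0, hpre, w_eq, ?_, ⟨?_, ?_, ?_, ?_, ?_, ?_, ?_, ?_⟩, ?_, ?_⟩, hle, ?_, ?_⟩, ?_⟩)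
    · v_inv
    · rw [w_kept .rsp rfl]
      exact hrsp
    · rw [w_mem]
      exact sret
    · rw [w_mem]
      exact s15
    · rw [w_mem]
      exact s14
    · rw [w_mem]
      exact s13
    · rw [w_mem]
      exact s12
    · rw [w_mem]
      exact sbp
    · rw [w_mem]
      exact sbx
    · rw [w_mem]
      exact hsame
    · rw [w_mem]
      exact hshadow
    · rw [w_kept .rbx rfl]
      exact hz
    · rw [w_kept .r15 rfl]
      exact hbase
    · -- `t < n'` from the branch: `base < z` unsigned
      exact Vorbis.Spec.imdct_step3_inner_s_loop_ld654_3.lt_of_base_lt_z hz hbase (by u_omega)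
  · -- 0x106c50 … 0x106c5e (stb_vorbis_fixed.c:2654): the epilogue, the contract's `Returned`
    refine ReachVia.done (Or.inr ?_)
    refine X86.User.Returned.mk w_rip w_rsp ?r_saved ?r_same (Vorbis.conv_code_in w_eq) ?r_inv ?r_post
    case r_saved =>
      intro r hr
      cases r <;> first
        | exact absurd hr (by decide)
        | (with_reducible assumption)
    case r_same =>
      rw [w_mem]
      exact hsame
    case r_inv => v_inv
    case r_post =>
      show ShadowUntouched ue.mem s_106c5e.mem
      rw [w_mem]
      exact hshadow
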